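-- pv_equiv track=rewrite | github.com/floudk/DRRS | evalution/controller/common_utils.py | compute_key_partitions
-- ===== SOURCE A (Python) =====
-- def compute_key_group_range_for_operator_index(max_parallelism: int, parallelism: int, operator_index: int):
--     if max_parallelism < parallelism:
--         raise ValueError("Maximum parallelism must not be smaller than parallelism.")
--
--     start = (operator_index * max_parallelism + parallelism - 1) // parallelism
--     end = ((operator_index + 1) * max_parallelism - 1) // parallelism
--
--     return start, end
--
-- def compute_key_partitions(max_parallelism: int, parallelism: int):
--     """
--     return a list of tuples, each tuple is (start_key, end_key) for each subtask
--     index of the list is the subtask index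
--     """
--     if max_parallelism < parallelism:
--         raise ValueError("Maximum parallelism must not be smaller than parallelism.")
--
--     key_partitions = []
--     for i in range(parallelism):
--         start, end = compute_key_group_range_for_operator_index(max_parallelism, parallelism, i)
--         key_partitions.append((start, end))
--
--     return key_partitions
-- ===== SOURCE B (Python) =====
-- def compute_key_partitions(max_parallelism: int, parallelism: int):
--     """
--     return a list of tuples, each tuple is (start_key, end_key) for each subtask
--     index of the list is the subtask index
--     """
--     if max_parallelism < parallelism:
--         raise ValueError("Maximum parallelism must not be smaller than parallelism.")
--     key_partitions = []
--     if parallelism > 0: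
--         q = max_parallelism // parallelism
--         r = max_parallelism % parallelism
--         start = 0
--         err = 0
--         for _ in range(parallelism):
--             err += r
--             if err > 0:
--                 size = q + 1
--                 err -= parallelism
--             else:
--                 size = q
--             key_partitions.append((start, start + size - 1))
--             start += size
--     return key_partitions
-- ===== Notes on version B (the rewrite author's own statement) =====
-- stated objective: alternative
-- what changed: Replaces A's two ceiling divisions per subtask by one divmod up front and a Bresenham-style additive error accumulator that decides, without any division in the loop, which subtasks get the extra key group; starts are carried incrementally.
import Mathlib
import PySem

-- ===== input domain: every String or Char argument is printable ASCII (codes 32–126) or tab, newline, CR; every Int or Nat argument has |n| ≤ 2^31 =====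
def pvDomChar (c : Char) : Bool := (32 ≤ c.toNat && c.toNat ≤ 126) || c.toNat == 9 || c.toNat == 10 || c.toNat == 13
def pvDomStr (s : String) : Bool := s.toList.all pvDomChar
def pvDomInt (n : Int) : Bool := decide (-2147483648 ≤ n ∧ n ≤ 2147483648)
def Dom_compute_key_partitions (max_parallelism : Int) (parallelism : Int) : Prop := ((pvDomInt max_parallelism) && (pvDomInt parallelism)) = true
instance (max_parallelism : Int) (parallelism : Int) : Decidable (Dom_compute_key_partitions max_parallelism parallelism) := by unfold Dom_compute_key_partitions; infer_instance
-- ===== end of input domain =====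

-- B replaces A's per-index ceiling divisions by one divmod up front and a
-- Bresenham-style additive error accumulator distributing the remainder
-- (no division in the loop): objective 'alternative'.

-- ===== PORT A =====
-- helper compute_key_group_range_for_operator_index; its raise branch is unreachable
-- from compute_key_partitions (guard already checked), ported as junk (0, 0).
def compute_key_group_range_for_operator_index (max_parallelism : Int) (parallelism : Int) (operator_index : Int) : Int × Int :=
  if max_parallelism < parallelism then (0, 0)
  else
    let start := PySem.Int.floordiv (operator_index * max_parallelism + parallelism - 1) parallelism
    let end_ := PySem.Int.floordiv ((operator_index + 1) * max_parallelism - 1) parallelism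
    (start, end_)

def compute_key_partitions (max_parallelism : Int) (parallelism : Int) : List (Int × Int) :=
  if max_parallelism < parallelism then []  -- Python raises ValueError here; excluded by Pre_
  else
    (PySem.List.pyRange 0 parallelism 1).foldl
      (fun key_partitions i =>
        key_partitions ++ [compute_key_group_range_for_operator_index max_parallelism parallelism i])
      []

-- ===== PORT B =====
-- loop body of B: add r to the error counter, take size q+1 when it is positive
-- (paying back parallelism), else size q; emit (start, start+size-1)
def pvBStep (parallelism q r : Int) (st : List (Int × Int) × Int × Int) (_i : Int) :
    List (Int × Int) × Int × Int :=
  let start := st.2.1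
  let err := st.2.2 + r
  let se := if err > 0 then (q + 1, err - parallelism) else (q, err)
  (st.1 ++ [(start, start + se.1 - 1)], start + se.1, se.2)

def compute_key_partitions_alt (max_parallelism : Int) (parallelism : Int) : List (Int × Int) :=
  if max_parallelism < parallelism then []  -- Python raises ValueError here; excluded by Pre_
  else if parallelism > 0 then
    ((PySem.List.pyRange 0 parallelism 1).foldl
      (pvBStep parallelism (PySem.Int.floordiv max_parallelism parallelism)
        (PySem.Int.mod max_parallelism parallelism))
      ([], 0, 0)).1
  else []

-- ===== PRECONDITION & SPEC =====
-- Pre_ excludes exactly the inputs on which Python A raises ValueError.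
def Pre_compute_key_partitions (max_parallelism : Int) (parallelism : Int) : Prop :=
  parallelism ≤ max_parallelism
instance (max_parallelism : Int) (parallelism : Int) : Decidable (Pre_compute_key_partitions max_parallelism parallelism) := by unfold Pre_compute_key_partitions; infer_instance

def pvWitness_compute_key_partitions : Int × Int := (10, 3)

def Spec_compute_key_partitions (max_parallelism : Int) (parallelism : Int) (out : List (Int × Int)) : Prop := out = compute_key_partitions_alt max_parallelism parallelism
instance (max_parallelism : Int) (parallelism : Int) (out : List (Int × Int)) : Decidable (Spec_compute_key_partitions max_parallelism parallelism out) := by unfold Spec_compute_key_partitions; infer_instance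

-- ===== CLAIM (what is proved, stated in full; the proofs are below) =====
def Claim_equal_compute_key_partitions : Prop := ∀ (max_parallelism : Int) (parallelism : Int), Dom_compute_key_partitions max_parallelism parallelism → Pre_compute_key_partitions max_parallelism parallelism → Spec_compute_key_partitions max_parallelism parallelism (compute_key_partitions max_parallelism parallelism)

-- ===== LEMMAS AND PROOFS =====

-- pvC mp p i = ceil(i*mp / p), the boundary both programs realise
def pvC (mp p i : Int) : Int := PySem.Int.floordiv (i * mp + p - 1) p

-- characterisation: for p > 0, p * pvC mp p i is the unique multiple of p in [i*mp, i*mp + p)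
lemma pvC_char (mp p i : Int) (hp : 0 < p) :
    i * mp ≤ p * pvC mp p i ∧ p * pvC mp p i < i * mp + p := by
  unfold pvC
  rw [PySem.Int.floordiv_eq_ediv_of_pos hp]
  have h1 := Int.mul_ediv_add_emod (i * mp + p - 1) p
  have h2 := Int.emod_nonneg (i * mp + p - 1) (by omega : p ≠ 0)
  have h3 := Int.emod_lt_of_pos (i * mp + p - 1) hp
  constructor <;> omega

lemma pvC_eq (mp p i k : Int) (hp : 0 < p)
    (h1 : i * mp ≤ p * k) (h2 : p * k < i * mp + p) : pvC mp p i = k := by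
  obtain ⟨hc1, hc2⟩ := pvC_char mp p i hp
  have ha : pvC mp p i < k + 1 := by
    have : p * pvC mp p i < p * (k + 1) := by nlinarith
    exact lt_of_mul_lt_mul_left this (le_of_lt hp)
  have hb : k < pvC mp p i + 1 := by
    have : p * k < p * (pvC mp p i + 1) := by nlinarith
    exact lt_of_mul_lt_mul_left this (le_of_lt hp)
  omega

-- A's end at index i equals pvC (i+1) - 1 (for p > 0)
lemma pvEnd_eq (mp p i : Int) (hp : 0 < p) :
    PySem.Int.floordiv ((i + 1) * mp - 1) p = pvC mp p (i + 1) - 1 := by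
  unfold pvC
  simp only [PySem.Int.floordiv]
  rw [show (i + 1) * mp + p - 1 = ((i + 1) * mp - 1) + 1 * p from by ring,
    Int.add_mul_fdiv_right _ _ (by omega : p ≠ 0)]
  omega

-- A's fold is a map
lemma pvA_map (mp p : Int) :
    (PySem.List.pyRange 0 p 1).foldl
      (fun key_partitions i =>
        key_partitions ++ [compute_key_group_range_for_operator_index mp p i]) []
    = (PySem.List.pyRange 0 p 1).map
        (fun i => compute_key_group_range_for_operator_index mp p i) := by
  rw [PySem.List.foldl_append_eq_flatMap]
  induction PySem.List.pyRange 0 p 1 with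
  | nil => simp
  | cons x xs ih => simp_all [List.flatMap]

-- B's fold invariant: at index i the running start is the boundary pvC i and the
-- error counter is i*mp - p*pvC i; folding the remaining range appends the
-- boundary pairs for indices i .. p-1.
lemma pvFoldB (mp p q r : Int) (hp : 0 < p) (hqr : p * q + r = mp)
    (hr0 : 0 ≤ r) (hr1 : r < p) :
    ∀ (n : Nat) (i : Int) (acc : List (Int × Int)), i + (n : Int) = p →
    (PySem.List.pyRange i p 1).foldl (pvBStep p q r)
      (acc, pvC mp p i, i * mp - p * pvC mp p i)
    = (acc ++ (PySem.List.pyRange i p 1).map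
        (fun j => (pvC mp p j, pvC mp p (j + 1) - 1)), pvC mp p p, p * mp - p * pvC mp p p) := by
  intro n
  induction n with
  | zero =>
      intro i acc h
      have hi : i = p := by omega
      rw [hi, PySem.List.pyRange_one_eq_nil (le_refl p)]
      simp
  | succ n ih =>
      intro i acc h
      have hlt : i < p := by omega
      rw [PySem.List.pyRange_one_cons hlt, List.foldl_cons, List.map_cons]
      obtain ⟨hc1, hc2⟩ := pvC_char mp p i hp
      have hexp : (i + 1) * mp = i * mp + mp := by ring
      have hstep : pvBStep p q r (acc, pvC mp p i, i * mp - p * pvC mp p i) i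
          = (acc ++ [(pvC mp p i, pvC mp p (i + 1) - 1)],
             pvC mp p (i + 1), (i + 1) * mp - p * pvC mp p (i + 1)) := by
        by_cases hcond : i * mp - p * pvC mp p i + r > 0
        · have hnext : pvC mp p (i + 1) = pvC mp p i + q + 1 := by
            apply pvC_eq mp p (i + 1) _ hp
            · have : p * (pvC mp p i + q + 1) = p * pvC mp p i + p * q + p := by ring
              omega
            · have : p * (pvC mp p i + q + 1) = p * pvC mp p i + p * q + p := by ring
              omega
          have herr : (i + 1) * mp - p * pvC mp p (i + 1)
              = i * mp - p * pvC mp p i + r - p := by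
            rw [hnext]
            have : p * (pvC mp p i + q + 1) = p * pvC mp p i + p * q + p := by ring
            omega
          simp only [pvBStep, if_pos hcond]
          rw [show pvC mp p i + (q + 1) - 1 = pvC mp p (i + 1) - 1 from by omega,
            show pvC mp p i + (q + 1) = pvC mp p (i + 1) from by omega,
            show i * mp - p * pvC mp p i + r - p = (i + 1) * mp - p * pvC mp p (i + 1) from by omega]
        · have hnext : pvC mp p (i + 1) = pvC mp p i + q := by
            apply pvC_eq mp p (i + 1) _ hp
            · have : p * (pvC mp p i + q) = p * pvC mp p i + p * q := by ring
              omega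
            · have : p * (pvC mp p i + q) = p * pvC mp p i + p * q := by ring
              omega
          have herr : (i + 1) * mp - p * pvC mp p (i + 1)
              = i * mp - p * pvC mp p i + r := by
            rw [hnext]
            have : p * (pvC mp p i + q) = p * pvC mp p i + p * q := by ring
            omega
          simp only [pvBStep, if_neg hcond]
          rw [show pvC mp p i + q - 1 = pvC mp p (i + 1) - 1 from by omega,
            show pvC mp p i + q = pvC mp p (i + 1) from by omega,
            show i * mp - p * pvC mp p i + r = (i + 1) * mp - p * pvC mp p (i + 1) from by omega]
      rw [hstep, ih (i + 1) (acc ++ [(pvC mp p i, pvC mp p (i + 1) - 1)]) (by omega)]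
      simp

-- ===== VERDICT (by name: the statement is the Claim_ definition above) =====
theorem compute_key_partitions_spec : Claim_equal_compute_key_partitions := by
  intro mp p _ hpre
  unfold Spec_compute_key_partitions compute_key_partitions compute_key_partitions_alt
  have hnlt : ¬ mp < p := not_lt.mpr hpre
  rw [if_neg hnlt, if_neg hnlt]
  by_cases hp : p > 0
  · rw [if_pos hp, pvA_map mp p]
    have hqr : p * PySem.Int.floordiv mp p + PySem.Int.mod mp p = mp := by
      have h := PySem.Int.floordiv_mul_add_mod mp p
      have h2 : PySem.Int.floordiv mp p * p = p * PySem.Int.floordiv mp p := mul_comm _ _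
      omega
    have h0 : pvC mp p 0 = 0 := by
      apply pvC_eq mp p 0 0 hp <;> omega
    have hinv := pvFoldB mp p (PySem.Int.floordiv mp p) (PySem.Int.mod mp p)
      hp hqr (PySem.Int.mod_nonneg mp hp) (PySem.Int.mod_lt mp hp) p.toNat 0 [] (by omega)
    rw [h0] at hinv
    simp only [zero_mul, mul_zero, sub_zero] at hinv
    rw [hinv]
    simp only [List.nil_append]
    apply List.map_congr_left
    intro i hi
    rw [PySem.List.mem_pyRange_one] at hi
    unfold compute_key_group_range_for_operator_index
    rw [if_neg hnlt]
    simp only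
    rw [pvEnd_eq mp p i hp]
    rfl
  · rw [if_neg hp]
    have h1 : PySem.List.pyRange 0 p 1 = [] :=
      PySem.List.pyRange_one_eq_nil (by omega)
    simp [h1]
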